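-- pv_equiv track=rewrite | github.com/chuanbinhub/MASTRseq | scripts/run_methylation_inSTR.py | left_trim_read
-- ===== SOURCE A (Python) =====
-- def left_trim_read(seq,str_seq,mc_arr,ml_arr,howmany):
--     """ discard all info upstream of the repeat
--     howmany variable determines whether we detect the STR in units of 4 or 2 repeats in tandem.
--     4 is default unless the count is recorded as 2 or 3 repeats """
--
--     find = seq.find(str_seq*howmany) #find first instance of 4 or 2 consecutive repeats
--     count_Cs_here = seq[:find]
--     count = 0
--     found = 0
--     found = count_Cs_here.find("C") #start by finding first C
--     while found != -1:
--         count +=1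
--         found = count_Cs_here.find("C",found+1) #continue to find next C until you reach the STR
--
--     #here, we find all the methylation calls that correspond to the C's upstream of the STR
--     place = 0
--     num_of_Cs_before_STR = mc_arr[place] + 1
--     while num_of_Cs_before_STR <= count and place < len(mc_arr)-1:
--         place += 1
--         num_of_Cs_before_STR = num_of_Cs_before_STR + mc_arr[place] + 1
--
--     #now, we trim out everything upstream of the STR in the original sequence, mc_arr, and ml_arr
--     seq_ltrim = seq[find:]
--     mc_ltrim = mc_arr[place:]
--     ml_ltrim = ml_arr[place:]
--     mc_ltrim[0] = mc_ltrim[0]-(count-(sum(mc_arr[:place])+len(mc_arr[:place])))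
--
--     return (seq[find:],mc_ltrim,ml_ltrim)
-- ===== SOURCE B (Python) =====
-- def _advance(mc_arr, place, rem, last):
--     """Drain a non-positive methylation budget by moving to the next mc entries."""
--     while rem <= 0 and place < last:
--         place += 1
--         rem += mc_arr[place] + 1
--     return place, rem
--
-- def left_trim_read(seq, str_seq, mc_arr, ml_arr, howmany):
--     """Trim everything upstream of the STR repeat from seq, mc_arr and ml_arr.
--
--     Rewritten as ONE fused pass: instead of first counting all C's in the prefix
--     and then scanning mc_arr with a running cumulative sum, we stream the prefix
--     characters while maintaining a 'remaining budget' (rem) for the current mc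
--     entry; each C spends one unit and, whenever the budget is exhausted, we
--     advance to the next entry (capped at the last index). No total C count and
--     no cumulative sums are ever computed; the final budget directly yields the
--     adjusted head of the trimmed mc array."""
--     find = seq.find(str_seq * howmany)
--     last = len(mc_arr) - 1
--     place, rem = _advance(mc_arr, 0, mc_arr[0] + 1, last)
--     for ch in seq[:find]:
--         if ch == 'C':
--             place, rem = _advance(mc_arr, place, rem - 1, last)
--     mc_ltrim = mc_arr[place:]
--     ml_ltrim = ml_arr[place:]
--     mc_ltrim[0] = rem - 1
--     return (seq[find:], mc_ltrim, ml_ltrim)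
-- ===== Notes on version B (the rewrite author's own statement) =====
-- stated objective: alternative
-- what changed: A's two staged passes (a find()-loop counting every C in the prefix, then a running-cumulative-sum scan of mc_arr against that total) are fused into one streaming pass that never computes the count or any cumulative sum: a per-entry 'remaining budget' is decremented at each C and, when exhausted, drained into the next mc entry, and the final budget itself gives the adjusted head value.
import Mathlib
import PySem

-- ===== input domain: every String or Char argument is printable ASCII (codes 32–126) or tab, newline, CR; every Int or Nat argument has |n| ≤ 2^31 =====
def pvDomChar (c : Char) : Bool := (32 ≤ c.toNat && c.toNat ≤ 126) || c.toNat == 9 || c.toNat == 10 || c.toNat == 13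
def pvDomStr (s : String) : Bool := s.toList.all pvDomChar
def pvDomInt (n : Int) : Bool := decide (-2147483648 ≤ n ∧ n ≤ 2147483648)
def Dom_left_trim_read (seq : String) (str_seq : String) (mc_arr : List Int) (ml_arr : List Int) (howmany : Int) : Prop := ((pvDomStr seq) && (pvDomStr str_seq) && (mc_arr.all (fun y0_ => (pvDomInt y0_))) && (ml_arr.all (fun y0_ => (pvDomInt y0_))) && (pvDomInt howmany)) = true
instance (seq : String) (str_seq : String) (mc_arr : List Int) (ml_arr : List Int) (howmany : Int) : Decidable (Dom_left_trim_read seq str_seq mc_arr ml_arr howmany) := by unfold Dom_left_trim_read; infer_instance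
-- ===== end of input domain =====

-- B fuses A's two staged passes (count all C's, then scan mc_arr with a running cumulative
-- sum) into one streaming pass over the prefix that maintains a per-entry remaining budget
-- (objective: alternative decomposition, same cost).

-- Python's str * int (empty for non-positive counts); used by both ports for 'str_seq*howmany'
def pyStrMul (cs : List Char) (n : Int) : List Char := (List.replicate n.toNat cs).flatten

-- ===== PORT A =====
-- 'while found != -1: count += 1; found = count_Cs_here.find("C", found+1)'
-- (the fuel only makes the loop structural; it is large enough to never run out)
def pvACountLoop (cs : List Char) (fuel : Nat) (count : Int) (found : Int) : Int :=
  match fuel with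
  | 0 => count
  | fuel + 1 =>
    if found ≠ -1 then
      pvACountLoop cs fuel (count + 1) (PySem.Chars.findFrom cs ['C'] (found + 1) none)
    else count

-- 'while num_of_Cs_before_STR <= count and place < len(mc_arr)-1:
--    place += 1; num_of_Cs_before_STR = num_of_Cs_before_STR + mc_arr[place] + 1'
def pvAPlaceLoop (mc : List Int) (count : Int) (fuel : Nat) (place : Int) (num : Int) : Int :=
  match fuel with
  | 0 => place
  | fuel + 1 =>
    if num ≤ count ∧ place < (mc.length : Int) - 1 then
      pvAPlaceLoop mc count fuel (place + 1) (num + PySem.List.pyGetD mc (place + 1) 0 + 1)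
    else place

def left_trim_read (seq : String) (str_seq : String) (mc_arr : List Int) (ml_arr : List Int) (howmany : Int) : String × List Int × List Int :=
  let s := seq.toList
  let find := PySem.Chars.find s (pyStrMul str_seq.toList howmany)
  let count_Cs_here := PySem.List.slice s none (some find)
  let count := pvACountLoop count_Cs_here (count_Cs_here.length + 1) 0 (PySem.Chars.find count_Cs_here ['C'])
  -- 'mc_arr[place]' with place = 0 raises IndexError on empty mc_arr: excluded by Pre_
  let place := pvAPlaceLoop mc_arr count mc_arr.length 0 (PySem.List.pyGetD mc_arr 0 0 + 1)
  let mc_ltrim := PySem.List.slice mc_arr (some place) none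
  let ml_ltrim := PySem.List.slice ml_arr (some place) none
  let pre := PySem.List.slice mc_arr none (some place)
  (String.ofList (PySem.List.slice s (some find) none),
   PySem.List.pySetD mc_ltrim 0
     (PySem.List.pyGetD mc_ltrim 0 0 - (count - (pre.sum + (pre.length : Int)))),
   ml_ltrim)

-- ===== PORT B =====
-- '_advance': 'while rem <= 0 and place < last: place += 1; rem += mc_arr[place] + 1'
-- (fuel = len(mc_arr) makes the loop structural; place rises towards last, so it never runs out)
def pvDrain (mc : List Int) (last : Int) (fuel : Nat) (place : Int) (rem : Int) : Int × Int :=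
  match fuel with
  | 0 => (place, rem)
  | fuel + 1 =>
    if rem ≤ 0 ∧ place < last then
      pvDrain mc last fuel (place + 1) (rem + PySem.List.pyGetD mc (place + 1) 0 + 1)
    else (place, rem)

def left_trim_read_alt (seq : String) (str_seq : String) (mc_arr : List Int) (ml_arr : List Int) (howmany : Int) : String × List Int × List Int :=
  let s := seq.toList
  let find := PySem.Chars.find s (pyStrMul str_seq.toList howmany)
  let last : Int := (mc_arr.length : Int) - 1
  -- 'place, rem = _advance(mc_arr, 0, mc_arr[0] + 1, last)'  (mc_arr[0] raises on []: Pre_)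
  let st0 := pvDrain mc_arr last mc_arr.length 0 (PySem.List.pyGetD mc_arr 0 0 + 1)
  -- 'for ch in seq[:find]: if ch == 'C': place, rem = _advance(mc_arr, place, rem - 1, last)'
  let st := (PySem.List.slice s none (some find)).foldl
      (fun st ch => if ch = 'C' then pvDrain mc_arr last mc_arr.length st.1 (st.2 - 1) else st) st0
  let mc_ltrim := PySem.List.slice mc_arr (some st.1) none
  let ml_ltrim := PySem.List.slice ml_arr (some st.1) none
  (String.ofList (PySem.List.slice s (some find) none),
   PySem.List.pySetD mc_ltrim 0 (st.2 - 1),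
   ml_ltrim)

-- ===== PRECONDITION & SPEC =====
-- Pre_ excludes only mc_arr = []: there Python A raises IndexError at 'mc_arr[place]'
-- (and Python B raises IndexError at 'mc_arr[0]').
def Pre_left_trim_read (seq : String) (str_seq : String) (mc_arr : List Int) (ml_arr : List Int) (howmany : Int) : Prop := mc_arr ≠ []
instance (seq : String) (str_seq : String) (mc_arr : List Int) (ml_arr : List Int) (howmany : Int) : Decidable (Pre_left_trim_read seq str_seq mc_arr ml_arr howmany) := by unfold Pre_left_trim_read; infer_instance

def pvWitness_left_trim_read : String × String × List Int × List Int × Int := ("AACCGCGCG", "CG", [1, 2], [3, 4], 2)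

def Spec_left_trim_read (seq : String) (str_seq : String) (mc_arr : List Int) (ml_arr : List Int) (howmany : Int) (out : String × List Int × List Int) : Prop := out = left_trim_read_alt seq str_seq mc_arr ml_arr howmany
instance (seq : String) (str_seq : String) (mc_arr : List Int) (ml_arr : List Int) (howmany : Int) (out : String × List Int × List Int) : Decidable (Spec_left_trim_read seq str_seq mc_arr ml_arr howmany out) := by unfold Spec_left_trim_read; infer_instance

-- ===== CLAIM (what is proved, stated in full; the proofs are below) =====
def Claim_equal_left_trim_read : Prop := ∀ (seq : String) (str_seq : String) (mc_arr : List Int) (ml_arr : List Int) (howmany : Int), Dom_left_trim_read seq str_seq mc_arr ml_arr howmany → Pre_left_trim_read seq str_seq mc_arr ml_arr howmany → Spec_left_trim_read seq str_seq mc_arr ml_arr howmany (left_trim_read seq str_seq mc_arr ml_arr howmany)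

-- ===== LEMMAS AND PROOFS =====

-- find.go on a one-character needle is idxOf
theorem pvFindGo_char (c : Char) (l : List Char) (k : Nat) :
    PySem.Chars.find.go [c] l k = if c ∈ l then ((k + l.idxOf c : Nat) : Int) else -1 := by
  induction l generalizing k with
  | nil => simp [PySem.Chars.find.go]
  | cons h t ih =>
    simp only [PySem.Chars.find.go, List.isPrefixOf, List.mem_cons, List.idxOf_cons]
    by_cases hc : h = c
    · simp [hc]
    · have : (h == c) = false := beq_false_of_ne hc
      simp [this, ih, Ne.symm hc]
      split <;> omega

theorem pvFind_char (c : Char) (l : List Char) :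
    PySem.Chars.find l [c] = if c ∈ l then ((l.idxOf c : Nat) : Int) else -1 := by
  simpa using pvFindGo_char c l 0

-- splitting a count at the first occurrence
theorem pvCount_split (c : Char) (l : List Char) (hm : c ∈ l) :
    l.count c = (l.drop (l.idxOf c + 1)).count c + 1 := by
  induction l with
  | nil => cases hm
  | cons h t ih =>
    by_cases hc : h = c
    · simp [List.idxOf_cons, hc, List.count_cons]
    · have hb : (h == c) = false := beq_false_of_ne hc
      have hm' : c ∈ t := by cases hm with
        | head => exact absurd rfl hc
        | tail _ h => exact h
      simp [List.idxOf_cons, hb, List.count_cons, ih hm']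

-- A's C-counting loop computes the character count of the remaining suffix
theorem pvACountLoop_eq (cs : List Char) (fuel k : Nat) (count : Int)
    (hk : k ≤ cs.length) (hf : cs.length + 1 - k ≤ fuel) :
    pvACountLoop cs fuel count (PySem.Chars.findFrom cs ['C'] (k : Int) none)
      = count + ((cs.drop k).count 'C' : Int) := by
  induction fuel generalizing k count with
  | zero => omega
  | succ fuel ih =>
    rw [PySem.Chars.findFrom_natCast cs ['C'] k hk, pvFind_char]
    by_cases hm : 'C' ∈ cs.drop k
    · have hidx : (cs.drop k).idxOf 'C' < (cs.drop k).length := List.idxOf_lt_length_of_mem hm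
      have hlen : (cs.drop k).length = cs.length - k := List.length_drop ..
      set i := (cs.drop k).idxOf 'C' with hi
      simp only [hm, if_true]
      have h1 : ¬(((i : Nat) : Int) = -1) := by omega
      have h2 : ¬(((k + i : Nat) : Int) = -1) := by omega
      rw [pvACountLoop]
      simp only [h1, h2, if_false, ne_eq, ite_not]
      rw [if_neg (by omega)]
      have hc3 : ((k : Int) + i + 1) = ((k + i + 1 : Nat) : Int) := by push_cast; ring
      rw [hc3, ih (k + i + 1) (count + 1) (by omega) (by omega)]
      have hdd : cs.drop (k + i + 1) = (cs.drop k).drop (i + 1) := by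
        rw [List.drop_drop]; ring_nf
      rw [hdd, pvCount_split 'C' (cs.drop k) hm, ← hi]
      push_cast; ring
    · simp only [hm, if_false]
      rw [pvACountLoop]
      simp [List.count_eq_zero_of_not_mem hm]

-- pvDrain from a Nat place does not depend on the fuel, as long as it is sufficient
theorem pvDrain_fuel (mc : List Int) (fuel fuel' : Nat) (p : Nat) (r : Int)
    (h : mc.length - 1 - p ≤ fuel) (h' : mc.length - 1 - p ≤ fuel') :
    pvDrain mc ((mc.length : Int) - 1) fuel (p : Int) r
      = pvDrain mc ((mc.length : Int) - 1) fuel' (p : Int) r := by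
  induction fuel generalizing fuel' p r with
  | zero =>
    have hstop : ¬((p : Int) < (mc.length : Int) - 1) := by omega
    cases fuel' with
    | zero => rfl
    | succ fuel' => rw [pvDrain, pvDrain, if_neg (by tauto)]
  | succ fuel ih =>
    cases fuel' with
    | zero =>
      have hstop : ¬((p : Int) < (mc.length : Int) - 1) := by omega
      rw [pvDrain, pvDrain, if_neg (by tauto)]
    | succ fuel' =>
      rw [pvDrain, pvDrain]
      by_cases hc : r ≤ 0 ∧ (p : Int) < (mc.length : Int) - 1
      · rw [if_pos hc, if_pos hc]
        have e : (p : Int) + 1 = ((p + 1 : Nat) : Int) := by push_cast; ring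
        rw [e]
        exact ih fuel' (p + 1) _ (by omega) (by omega)
      · rw [if_neg hc, if_neg hc]

-- one step of a drain with a positive condition
theorem pvDrain_step (mc : List Int) (last : Int) (fuel : Nat) (p r : Int)
    (hfuel : 0 < fuel) (h : r ≤ 0 ∧ p < last) :
    pvDrain mc last fuel p r
      = pvDrain mc last (fuel - 1) (p + 1) (r + PySem.List.pyGetD mc (p + 1) 0 + 1) := by
  obtain ⟨f, rfl⟩ : ∃ f, fuel = f + 1 := ⟨fuel - 1, by omega⟩
  simp only [Nat.add_sub_cancel]
  rw [pvDrain, if_pos h]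

-- draining, then spending one unit and draining again = spending the unit first
theorem pvDrain_comp (mc : List Int) (fuel : Nat) (p : Nat) (r : Int)
    (hp : p < mc.length) (hf : mc.length - 1 - p ≤ fuel) :
    pvDrain mc ((mc.length : Int) - 1) mc.length
        (pvDrain mc ((mc.length : Int) - 1) fuel (p : Int) r).1
        ((pvDrain mc ((mc.length : Int) - 1) fuel (p : Int) r).2 - 1)
      = pvDrain mc ((mc.length : Int) - 1) mc.length (p : Int) (r - 1) := by
  induction fuel generalizing p r with
  | zero =>
    rw [pvDrain]
  | succ fuel ih =>
    rw [pvDrain]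
    by_cases hc : r ≤ 0 ∧ (p : Int) < (mc.length : Int) - 1
    · rw [if_pos hc]
      have hp1 : p + 1 < mc.length := by omega
      have e : (p : Int) + 1 = ((p + 1 : Nat) : Int) := by push_cast; ring
      rw [e, ih (p + 1) _ hp1 (by omega)]
      have hRHS : pvDrain mc ((mc.length : Int) - 1) mc.length (p : Int) (r - 1)
          = pvDrain mc ((mc.length : Int) - 1) (mc.length - 1) ((p : Int) + 1)
              (r - 1 + PySem.List.pyGetD mc ((p : Int) + 1) 0 + 1) :=
        pvDrain_step mc _ mc.length (p : Int) (r - 1) (by omega) ⟨by omega, hc.2⟩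
      rw [hRHS, e]
      have e3 : r - 1 + PySem.List.pyGetD mc (((p + 1 : Nat) : Int)) 0 + 1
          = r + PySem.List.pyGetD mc (((p + 1 : Nat) : Int)) 0 + 1 - 1 := by ring
      rw [e3]
      exact pvDrain_fuel mc mc.length (mc.length - 1) (p + 1) _ (by omega) (by omega)
    · rw [if_neg hc]

-- B's streaming loop equals one drain of the total C count
theorem pvFold_drain (mc : List Int) (l : List Char) (p : Nat) (r : Int) (hp : p < mc.length) :
    l.foldl (fun st ch => if ch = 'C'
        then pvDrain mc ((mc.length : Int) - 1) mc.length st.1 (st.2 - 1) else st)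
        (pvDrain mc ((mc.length : Int) - 1) mc.length (p : Int) r)
      = pvDrain mc ((mc.length : Int) - 1) mc.length (p : Int) (r - (l.count 'C' : Int)) := by
  induction l generalizing r with
  | nil => simp
  | cons ch t ih =>
    rw [List.foldl_cons]
    by_cases hch : ch = 'C'
    · subst hch
      rw [if_pos rfl, pvDrain_comp mc mc.length p r hp (by omega), ih (r - 1)]
      have e : r - 1 - (t.count 'C' : Int) = r - ((('C' :: t).count 'C' : Nat) : Int) := by
        simp [List.count_cons]; push_cast; ring
      rw [e]
    · rw [if_neg hch, ih r]
      have e : (ch :: t).count 'C' = t.count 'C' := by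
        simp [List.count_cons, hch]
      rw [e]

-- A's place loop and B's drain run in lockstep (rem = num - count), and the final
-- num is the cumulative sum at the final place
theorem pvLockstep (mc : List Int) (count : Int) (fuel : Nat) (p : Nat) (num : Int)
    (hp : p < mc.length) (hnum : num = (mc.take (p + 1)).sum + p + 1) :
    ∃ q : Nat, q < mc.length ∧
      pvDrain mc ((mc.length : Int) - 1) fuel (p : Int) (num - count)
        = ((q : Int), (mc.take (q + 1)).sum + q + 1 - count) ∧
      pvAPlaceLoop mc count fuel (p : Int) num = (q : Int) := by
  induction fuel generalizing p num with
  | zero =>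
    exact ⟨p, hp, by rw [pvDrain, hnum], by rw [pvAPlaceLoop]⟩
  | succ fuel ih =>
    rw [pvDrain, pvAPlaceLoop]
    by_cases hc : num ≤ count ∧ (p : Int) < (mc.length : Int) - 1
    · have hc' : num - count ≤ 0 ∧ (p : Int) < (mc.length : Int) - 1 := ⟨by omega, hc.2⟩
      rw [if_pos hc, if_pos hc']
      have hp1 : p + 1 < mc.length := by omega
      have e : (p : Int) + 1 = ((p + 1 : Nat) : Int) := by push_cast; ring
      have hget : PySem.List.pyGetD mc ((p : Int) + 1) 0 = mc[p + 1]'hp1 := by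
        rw [e, PySem.List.pyGetD_natCast]
        simp [List.getD, List.getElem?_eq_getElem hp1]
      have hnum' : num + PySem.List.pyGetD mc ((p : Int) + 1) 0 + 1
          = (mc.take (p + 1 + 1)).sum + (p + 1 : Nat) + 1 := by
        rw [hget, hnum, List.sum_take_succ mc (p + 1) hp1]
        push_cast; ring
      have e2 : num - count + PySem.List.pyGetD mc ((p : Int) + 1) 0 + 1
          = (num + PySem.List.pyGetD mc ((p : Int) + 1) 0 + 1) - count := by ring
      rw [e2, e]
      exact ih (p + 1) _ hp1 hnum'
    · have hc' : ¬(num - count ≤ 0 ∧ (p : Int) < (mc.length : Int) - 1) := by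
        intro h; exact hc ⟨by omega, h.2⟩
      rw [if_neg hc, if_neg hc']
      exact ⟨p, hp, by rw [hnum], rfl⟩

-- ===== VERDICT (by name: the statement is the Claim_ definition above) =====
theorem left_trim_read_spec : Claim_equal_left_trim_read := by
  intro seq str_seq mc ml how _ hpre
  unfold Pre_left_trim_read at hpre
  have hn : 0 < mc.length := List.length_pos_of_ne_nil hpre
  unfold Spec_left_trim_read
  show left_trim_read seq str_seq mc ml how = left_trim_read_alt seq str_seq mc ml how
  simp only [left_trim_read, left_trim_read_alt]
  set s := seq.toList with hs
  set fd := PySem.Chars.find s (pyStrMul str_seq.toList how) with hfd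
  set cch := PySem.List.slice s none (some fd) with hcch
  -- A's count loop yields the number of C's in the prefix
  have hcount : pvACountLoop cch (cch.length + 1) 0 (PySem.Chars.find cch ['C'])
      = ((cch.count 'C' : Nat) : Int) := by
    have h0 : PySem.Chars.find cch ['C'] = PySem.Chars.findFrom cch ['C'] ((0 : Nat) : Int) none := by
      simp [PySem.Chars.findFrom_zero]
    rw [h0, pvACountLoop_eq cch (cch.length + 1) 0 0 (by omega) (by omega)]
    simp
  rw [hcount]
  -- the shared initial 'num' value
  have hnum0 : PySem.List.pyGetD mc 0 0 + 1 = (mc.take (0 + 1)).sum + ((0 : Nat) : Int) + 1 := by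
    rw [PySem.List.pyGetD_eq_getElem mc 0 (by norm_num) (by exact_mod_cast hn)]
    have h1 := List.sum_take_succ mc 0 hn
    simp at h1 ⊢
    omega
  -- lockstep: A's place loop and one total drain agree
  obtain ⟨q, hq, hdrain, hplace⟩ :=
    pvLockstep mc ((cch.count 'C' : Nat) : Int) mc.length 0 (PySem.List.pyGetD mc 0 0 + 1) hn hnum0
  -- B's fold equals that total drain
  have hfold := pvFold_drain mc cch 0 (PySem.List.pyGetD mc 0 0 + 1) hn
  simp only [Nat.cast_zero] at hdrain hplace hfold
  rw [hdrain] at hfold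
  rw [hplace, hfold]
  -- both sides now slice at (q : Int); only the head adjustment remains
  refine congrArg₂ Prod.mk rfl (congrArg₂ Prod.mk ?_ rfl)
  refine congrArg₂ (PySem.List.pySetD · 0 ·) rfl ?_
  have hslice_from : PySem.List.slice mc (some ((q : Nat) : Int)) none = mc.drop q :=
    PySem.List.slice_from_natCast ..
  have hslice_to : PySem.List.slice mc none (some ((q : Nat) : Int)) = mc.take q :=
    PySem.List.slice_to_natCast ..
  have hhead : PySem.List.pyGetD (mc.drop q) 0 0 = mc[q]'hq := by
    have h2 : (mc.drop q) = mc[q]'hq :: mc.drop (q + 1) := List.drop_eq_getElem_cons hq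
    rw [h2, PySem.List.pyGetD_zero, List.getD_cons_zero]
  rw [hslice_from, hslice_to, hhead]
  have hsum : (mc.take (q + 1)).sum = (mc.take q).sum + mc[q]'hq := List.sum_take_succ mc q hq
  have hlen : ((mc.take q).length : Int) = (q : Int) := by
    simp [List.length_take]; omega
  rw [hlen]
  omega
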